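-- pv_equiv track=rewrite | github.com/fizzalari/easy-wallet-backup | xprv.py | conv_bits
-- ===== SOURCE A (Python) =====
-- def conv_bits(d, f_bits, t_bits, pad=True):
--     acc = 0
--     bits = 0
--     ret = []
--     maxv = (1 << t_bits) - 1
--     for v in d:
--         if v < 0 or v >> f_bits:
--             raise ValueError("Invalid value")
--         acc = (acc << f_bits) | v
--         bits += f_bits
--         while bits >= t_bits:
--             bits -= t_bits
--             ret.append((acc >> bits) & maxv)
--     if pad and bits:
--         ret.append((acc << (t_bits - bits)) & maxv)
--     elif bits >= f_bits or ((acc << (t_bits - bits)) & maxv):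
--         raise ValueError("Invalid bits")
--     return ret
-- ===== SOURCE B (Python) =====
-- def conv_bits(d, f_bits, t_bits, pad=True):
--     # Two-pass: flatten to an explicit MSB-first bit list, then chop it into t_bits groups.
--     bits = []
--     for v in d:
--         if v < 0 or v >> f_bits:
--             raise ValueError("Invalid value")
--         for i in reversed(range(f_bits)):
--             bits.append((v >> i) & 1)
--     ret = []
--     while len(bits) >= t_bits:
--         head, bits = bits[:t_bits], bits[t_bits:]
--         g = 0
--         for b in head:
--             g = 2 * g + b
--         ret.append(g)
--     if bits:
--         if pad:
--             g = 0
--             for b in bits: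
--                 g = 2 * g + b
--             ret.append(g << (t_bits - len(bits)))
--         elif len(bits) >= f_bits or any(bits):
--             raise ValueError("Invalid bits")
--     return ret
-- ===== Notes on version B (the rewrite author's own statement) =====
-- stated objective: alternative
-- what changed: Replaces A's single-pass accumulator/bit-counter with an explicit two-phase pipeline: first flatten all values into an MSB-first bit list, then greedily chop that list into t_bits groups, handling the padded/unpadded tail on the leftover bit list.
-- outside the precondition, e.g. on conv_bits([], 8, 0, True): A returns [], B does not finish within the time limit
import Mathlib
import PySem

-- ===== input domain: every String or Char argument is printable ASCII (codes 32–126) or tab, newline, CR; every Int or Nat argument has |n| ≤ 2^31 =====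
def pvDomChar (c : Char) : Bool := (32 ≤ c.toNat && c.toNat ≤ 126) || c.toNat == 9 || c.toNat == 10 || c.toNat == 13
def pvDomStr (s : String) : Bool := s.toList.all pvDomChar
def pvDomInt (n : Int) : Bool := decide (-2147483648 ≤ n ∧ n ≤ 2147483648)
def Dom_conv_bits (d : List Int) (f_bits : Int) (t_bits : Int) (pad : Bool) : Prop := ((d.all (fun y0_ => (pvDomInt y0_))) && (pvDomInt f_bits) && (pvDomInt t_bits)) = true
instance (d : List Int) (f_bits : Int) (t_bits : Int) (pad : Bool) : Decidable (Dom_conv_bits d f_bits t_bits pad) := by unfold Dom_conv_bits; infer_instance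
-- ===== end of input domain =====

-- B replaces A's running accumulator/bit-counter with a two-phase pipeline (flatten to an
-- explicit MSB-first bit list, then chop it into t_bits-groups); same results, no speed claim.


-- ===== PORT A =====
-- Python's `& | << >>` on ints are ported as Int.land / Int.lor / `<<<` / `>>>`; every shift
-- count reached is nonnegative (guards below return the raise/diverge marker where Python
-- raises or diverges), so `.toNat` on a shift count is exact.
-- the inner `while bits >= t_bits` loop; the extra conjunct `1 ≤ t_bits` only models that
-- Python's while diverges for t_bits ≤ 0 (bits never drops below t_bits there)
def conv_bits_while (t_bits maxv acc : Int) (bits : Int) (ret : List Int) : Int × List Int :=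
  if h : t_bits ≤ bits ∧ 1 ≤ t_bits then
    conv_bits_while t_bits maxv acc (bits - t_bits)
      (ret ++ [Int.land (acc >>> (bits - t_bits).toNat) maxv])
  else (bits, ret)
termination_by bits.toNat
decreasing_by omega

-- the `for v in d` loop; `none` = ValueError ("Invalid value"); `v >> f_bits` raises for f_bits < 0
def conv_bits_loop (f_bits t_bits maxv : Int) :
    List Int → Int → Int → List Int → Option (Int × Int × List Int)
  | [], acc, bits, ret => some (acc, bits, ret)
  | v :: d, acc, bits, ret =>
    if v < 0 ∨ f_bits < 0 ∨ (v >>> f_bits.toNat) ≠ 0 then none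
    else
      let acc' := Int.lor (acc <<< f_bits.toNat) v
      let p := conv_bits_while t_bits maxv acc' (bits + f_bits) ret
      conv_bits_loop f_bits t_bits maxv d acc' p.1 p.2

def conv_bits (d : List Int) (f_bits : Int) (t_bits : Int) (pad : Bool) : List Int :=
  -- `none` = Python raises; the wrapper returns [] there (all such inputs are outside Pre_)
  (if t_bits < 0 then none   -- `1 << t_bits` raises for t_bits < 0
   else
     let maxv : Int := ((1 : Int) <<< t_bits.toNat) - 1
     match conv_bits_loop f_bits t_bits maxv d 0 0 [] with
     | none => none
     | some (acc, bits, ret) =>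
       if pad && !(bits == 0) then
         some (ret ++ [Int.land (acc <<< (t_bits - bits).toNat) maxv])
       else if bits ≥ f_bits ∨ Int.land (acc <<< (t_bits - bits).toNat) maxv ≠ 0 then none
       else some ret).getD []

-- ===== PORT B =====
-- `for i in reversed(range(f_bits)): bits.append((v >> i) & 1)` — every i is ≥ 0
def conv_bits_alt_emit (f_bits v : Int) : List Int :=
  ((PySem.List.pyRange 0 f_bits 1).reverse).map (fun i => Int.land (v >>> i.toNat) 1)

-- first pass: validate each value and append its f_bits bits; `none` = ValueError
def conv_bits_alt_flat (f_bits : Int) : List Int → List Int → Option (List Int)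
  | [], bits => some bits
  | v :: d, bits =>
    if v < 0 ∨ f_bits < 0 ∨ (v >>> f_bits.toNat) ≠ 0 then none
    else conv_bits_alt_flat f_bits d (bits ++ conv_bits_alt_emit f_bits v)

-- `g = 0; for b in l: g = 2*g + b`
def conv_bits_alt_num (l : List Int) : Int := l.foldl (fun g b => 2 * g + b) 0

-- second pass: `while len(bits) >= t_bits: head, bits = bits[:t_bits], bits[t_bits:] …`;
-- the slices are exact as take/drop since the guard gives 0 < t_bits ≤ len(bits);
-- `1 ≤ t_bits` models that the Python while diverges for t_bits ≤ 0
def conv_bits_alt_chop (t_bits : Int) (bits ret : List Int) : List Int × List Int :=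
  if h : t_bits ≤ (bits.length : Int) ∧ 1 ≤ t_bits then
    conv_bits_alt_chop t_bits (bits.drop t_bits.toNat)
      (ret ++ [conv_bits_alt_num (bits.take t_bits.toNat)])
  else (bits, ret)
termination_by bits.length
decreasing_by simp; omega

def conv_bits_alt (d : List Int) (f_bits : Int) (t_bits : Int) (pad : Bool) : List Int :=
  -- `none` = Python raises; the wrapper returns [] there (all such inputs are outside Pre_)
  (match conv_bits_alt_flat f_bits d [] with
   | none => none
   | some bits0 =>
     let p := conv_bits_alt_chop t_bits bits0 []
     if p.1.isEmpty then some p.2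
     else if pad then
       some (p.2 ++ [conv_bits_alt_num p.1 <<< (t_bits - (p.1.length : Int)).toNat])
     else if (p.1.length : Int) ≥ f_bits ∨ p.1.any (fun b => b ≠ 0) then none
     else some p.2).getD []

-- ===== PRECONDITION & SPEC =====
-- Pre_ admits exactly the inputs where Python A returns normally, except the degenerate
-- t_bits ≤ 0 (the loop diverges there for every nonempty d; only d = [] with t_bits = 0
-- returns [], which is excluded and cited) — A raises ValueError on every other excluded
-- input (invalid value, f_bits ≤ 0, or the unpadded leftover-bits check).
def Pre_conv_bits (d : List Int) (f_bits : Int) (t_bits : Int) (pad : Bool) : Prop :=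
  1 ≤ f_bits ∧ 1 ≤ t_bits ∧ (∀ v ∈ d, 0 ≤ v ∧ v < 2 ^ f_bits.toNat) ∧
  (pad = true ∨
    (((d.length : Int) * f_bits) % t_bits < f_bits ∧
      (d.getLastD 0) % 2 ^ ((((d.length : Int) * f_bits) % t_bits).toNat) = 0))
instance (d : List Int) (f_bits : Int) (t_bits : Int) (pad : Bool) :
    Decidable (Pre_conv_bits d f_bits t_bits pad) := by unfold Pre_conv_bits; infer_instance

def pvWitness_conv_bits : List Int × Int × Int × Bool := ([3, 1], 2, 3, true)

def Spec_conv_bits (d : List Int) (f_bits : Int) (t_bits : Int) (pad : Bool) (out : List Int) : Prop := out = conv_bits_alt d f_bits t_bits pad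
instance (d : List Int) (f_bits : Int) (t_bits : Int) (pad : Bool) (out : List Int) : Decidable (Spec_conv_bits d f_bits t_bits pad out) := by unfold Spec_conv_bits; infer_instance

-- ===== CLAIM (what is proved, stated in full; the proofs are below) =====
def Claim_equal_conv_bits : Prop := ∀ (d : List Int) (f_bits : Int) (t_bits : Int) (pad : Bool), Dom_conv_bits d f_bits t_bits pad → Pre_conv_bits d f_bits t_bits pad → Spec_conv_bits d f_bits t_bits pad (conv_bits d f_bits t_bits pad)

-- ===== LEMMAS AND PROOFS =====

-- all elements of a bit list are 0 or 1
def IsBits (l : List Int) : Prop := ∀ b ∈ l, b = 0 ∨ b = 1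

-- the flattened bit stream of the whole input
def streamE (f_bits : Int) (d : List Int) : List Int := d.flatMap (conv_bits_alt_emit f_bits)

-- ---- generic arithmetic over bit lists ----

theorem bnum_foldl_init (l : List Int) (g0 : Int) :
    l.foldl (fun g b => 2 * g + b) g0 = g0 * 2 ^ l.length + conv_bits_alt_num l := by
  induction l generalizing g0 with
  | nil => simp [conv_bits_alt_num]
  | cons x l ih =>
    simp only [List.foldl_cons, conv_bits_alt_num, List.length_cons]
    rw [ih (2 * g0 + x), ih (2 * 0 + x)]
    ring

theorem bnum_append (X Y : List Int) :
    conv_bits_alt_num (X ++ Y) =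
      conv_bits_alt_num X * 2 ^ Y.length + conv_bits_alt_num Y := by
  unfold conv_bits_alt_num
  rw [List.foldl_append, bnum_foldl_init]
  rfl

theorem bnum_cons (x : Int) (l : List Int) :
    conv_bits_alt_num (x :: l) = x * 2 ^ l.length + conv_bits_alt_num l := by
  have := bnum_append [x] l
  simpa [conv_bits_alt_num] using this

theorem bnum_bounds {l : List Int} (h : IsBits l) :
    0 ≤ conv_bits_alt_num l ∧ conv_bits_alt_num l < 2 ^ l.length := by
  induction l with
  | nil => simp [conv_bits_alt_num]
  | cons x l ih =>
    have hx := h x (by simp)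
    have ihh := ih (fun b hb => h b (by simp [hb]))
    rw [bnum_cons]
    have hp : (0:Int) < 2 ^ l.length := by positivity
    constructor
    · rcases hx with hx | hx <;> simp [hx] <;> nlinarith [ihh.1]
    · simp only [List.length_cons, pow_succ]
      rcases hx with hx | hx <;> simp [hx] <;> nlinarith [ihh.2]

theorem bnum_eq_zero {l : List Int} (h : IsBits l) (h0 : conv_bits_alt_num l = 0) :
    ∀ b ∈ l, b = 0 := by
  induction l with
  | nil => simp
  | cons x l ih =>
    have hx := h x (by simp)
    have htl : IsBits l := fun b hb => h b (by simp [hb])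
    have hb := bnum_bounds htl
    have hc := bnum_cons x l
    rw [h0] at hc
    have hp : (0:Int) < 2 ^ l.length := by positivity
    have hx0 : x = 0 := by
      rcases hx with hx | hx
      · exact hx
      · exfalso; rw [hx] at hc; nlinarith [hb.1]
    have hl0 : conv_bits_alt_num l = 0 := by rw [hx0] at hc; linarith
    intro b hb'
    rcases List.mem_cons.mp hb' with h1 | h1
    · exact h1 ▸ hx0
    · exact ih htl hl0 b h1

-- suffix value = value mod the suffix power
theorem bnum_suffix {X Y : List Int} (hY : IsBits Y) :
    conv_bits_alt_num Y = conv_bits_alt_num (X ++ Y) % 2 ^ Y.length := by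
  rw [bnum_append]
  have hb := bnum_bounds hY
  rw [Int.add_comm, Int.mul_comm, Int.add_mul_emod_self_left, Int.emod_eq_of_lt hb.1 hb.2]

-- ---- bit operations to arithmetic (nonnegative operands) ----

theorem land_mask {a : Int} (ha : 0 ≤ a) (t : Nat) :
    Int.land a (2 ^ t - 1) = a % 2 ^ t := by
  obtain ⟨m, rfl⟩ := Int.eq_ofNat_of_zero_le ha
  have h1 : ((2 : Int) ^ t - 1) = ((2 ^ t - 1 : Nat) : Int) := by
    have : 1 ≤ 2 ^ t := Nat.one_le_two_pow
    push_cast [this]; ring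
  rw [h1]
  have h2 : Int.land (m : Int) ((2 ^ t - 1 : Nat) : Int) = ((m &&& (2 ^ t - 1) : Nat) : Int) := rfl
  rw [h2, Nat.and_two_pow_sub_one_eq_mod]
  push_cast
  rfl

theorem land_one {a : Int} (ha : 0 ≤ a) : Int.land a 1 = a % 2 := by
  have := land_mask ha 1
  simpa using this

theorem shiftr_eq (a : Int) (n : Nat) : a >>> (n : Int) = a / 2 ^ n := by
  rw [Int.shiftRight_natCast_right, Int.shiftRight_eq_div_pow]
  push_cast
  rfl

theorem shiftrN (a : Int) (n : Nat) : a >>> n = a / 2 ^ n := by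
  rw [Int.shiftRight_eq_div_pow]; push_cast; rfl

theorem shiftlN (a : Int) (n : Nat) : a <<< n = a * 2 ^ n := Int.shiftLeft_eq a n

theorem isBits_subset {l m : List Int} (h : IsBits l) (hs : m ⊆ l) : IsBits m :=
  fun b hb => h b (hs hb)

theorem lor_disjoint {a v : Int} (f : Nat) (ha : 0 ≤ a) (hv : 0 ≤ v) (hvf : v < 2 ^ f) :
    Int.lor (a <<< f) v = a * 2 ^ f + v := by
  obtain ⟨m, rfl⟩ := Int.eq_ofNat_of_zero_le ha
  obtain ⟨k, rfl⟩ := Int.eq_ofNat_of_zero_le hv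
  have hk : k < 2 ^ f := by exact_mod_cast hvf
  have h1 : ((m : Int) <<< f) = ((m <<< f : Nat) : Int) := by
    rw [shiftlN, Nat.shiftLeft_eq]; push_cast; ring
  rw [h1]
  have h2 : Int.lor ((m <<< f : Nat) : Int) (k : Int) = (((m <<< f) ||| k : Nat) : Int) := rfl
  rw [h2]
  have h3 : (m <<< f) ||| k = m * 2 ^ f + k := by
    rw [Nat.shiftLeft_eq]
    apply Nat.eq_of_testBit_eq
    intro j
    rw [Nat.testBit_lor]
    have hm : 2 ^ f * m + k = m * 2 ^ f + k := by ring
    rw [← hm, Nat.testBit_two_pow_mul_add m hk j]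
    have hm0 : m * 2 ^ f = 2 ^ f * m + 0 := by ring
    rw [hm0, Nat.testBit_two_pow_mul_add m (by positivity) j]
    by_cases hj : j < f
    · have : k.testBit j = k.testBit j := rfl
      simp [hj]
    · have hkj : k.testBit j = false :=
        Nat.testBit_lt_two_pow (lt_of_lt_of_le hk (Nat.pow_le_pow_right (by norm_num) (by omega)))
      simp [hj, hkj]
  rw [h3]
  push_cast
  ring

-- ---- the emitted bit list of one value ----

theorem emit_eq_range {f_bits : Int} (hf : 0 ≤ f_bits) (v : Int) :
    conv_bits_alt_emit f_bits v =
      ((List.range f_bits.toNat).reverse).map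
        (fun i : Nat => Int.land (v >>> (i : Int)) 1) := by
  unfold conv_bits_alt_emit
  conv_lhs => rw [show f_bits = (f_bits.toNat : Int) from (Int.toNat_of_nonneg hf).symm]
  rw [PySem.List.pyRange_zero_natCast, ← List.map_reverse, List.map_map]
  simp [Function.comp]

theorem emit_length {f_bits : Int} (hf : 0 ≤ f_bits) (v : Int) :
    (conv_bits_alt_emit f_bits v).length = f_bits.toNat := by
  rw [emit_eq_range hf]
  simp

theorem emit_isBits (f_bits : Int) {v : Int} (hv : 0 ≤ v) :
    IsBits (conv_bits_alt_emit f_bits v) := by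
  intro b hb
  simp only [conv_bits_alt_emit, List.mem_map] at hb
  obtain ⟨i, _, rfl⟩ := hb
  have h0 : 0 ≤ v >>> ((i.toNat : Nat) : Int) := by
    rw [shiftr_eq]; exact Int.ediv_nonneg hv (by positivity)
  rw [land_one h0]
  omega

theorem emit_bnum {f_bits v : Int} (hf : 0 ≤ f_bits) (hv : 0 ≤ v) :
    conv_bits_alt_num (conv_bits_alt_emit f_bits v) = v % 2 ^ f_bits.toNat := by
  rw [emit_eq_range hf]
  induction f_bits.toNat with
  | zero => simp [conv_bits_alt_num]
  | succ n ih =>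
    rw [List.range_succ, List.reverse_append]
    simp only [List.reverse_cons, List.reverse_nil, List.nil_append, List.singleton_append,
      List.map_cons]
    rw [bnum_cons]
    simp only [List.length_map, List.length_reverse, List.length_range]
    rw [ih]
    have h0 : 0 ≤ v >>> ((n : Nat) : Int) := by
      rw [shiftr_eq]; exact Int.ediv_nonneg hv (by positivity)
    rw [land_one h0, shiftr_eq]
    have hA : (0:Int) < 2 ^ n := by positivity
    have h1 := Int.mul_ediv_add_emod v (2 ^ n)
    have h2 := Int.mul_ediv_add_emod (v / 2 ^ n) 2
    have hb1 : 0 ≤ v % 2 ^ n := Int.emod_nonneg v (by positivity)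
    have hb1' : v % 2 ^ n < 2 ^ n := Int.emod_lt_of_pos v hA
    have hb2 : 0 ≤ v / 2 ^ n % 2 := Int.emod_nonneg _ (by norm_num)
    have hb2' : v / 2 ^ n % 2 < 2 := Int.emod_lt_of_pos _ (by norm_num)
    have hv' : v = (v / 2 ^ n % 2 * 2 ^ n + v % 2 ^ n) + (2 * 2 ^ n) * (v / 2 ^ n / 2) := by
      linear_combination -h1 - (2:Int) ^ n * h2
    have key : v % (2 * 2 ^ n) = v / 2 ^ n % 2 * 2 ^ n + v % 2 ^ n := by
      conv_lhs => rw [hv']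
      rw [Int.add_mul_emod_self_left]
      exact Int.emod_eq_of_lt (by nlinarith) (by nlinarith)
    rw [pow_succ, mul_comm ((2:Int)^n) 2, key]

theorem stream_isBits (f_bits : Int) {d : List Int} (hd : ∀ v ∈ d, 0 ≤ v) :
    IsBits (streamE f_bits d) := by
  intro b hb
  simp only [streamE, List.mem_flatMap] at hb
  obtain ⟨v, hv, hb⟩ := hb
  exact emit_isBits f_bits (hd v hv) b hb

theorem stream_length {f_bits : Int} (hf : 0 ≤ f_bits) (d : List Int) :
    (streamE f_bits d).length = d.length * f_bits.toNat := by
  induction d with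
  | nil => simp [streamE]
  | cons v d ih =>
    simp only [streamE, List.flatMap_cons, List.length_append] at *
    rw [ih, emit_length hf]
    simp [Nat.succ_mul, Nat.add_comm]

-- ---- chop: pending part is a suffix of length (len % t) ----

theorem chop_pending {t_bits : Int} (ht : 1 ≤ t_bits) :
    ∀ Q ret, ∃ k, (conv_bits_alt_chop t_bits Q ret).1 = Q.drop k ∧
      (conv_bits_alt_chop t_bits Q ret).1.length = Q.length % t_bits.toNat := by
  intro Q
  induction hn : Q.length using Nat.strong_induction_on generalizing Q with
  | _ n ih =>
  intro ret
  rw [conv_bits_alt_chop]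
  by_cases h : t_bits ≤ (Q.length : Int) ∧ 1 ≤ t_bits
  · rw [dif_pos h]
    have htn : 1 ≤ t_bits.toNat := by omega
    have hle : t_bits.toNat ≤ Q.length := by omega
    have hlen : (Q.drop t_bits.toNat).length = n - t_bits.toNat := by simp [hn]
    obtain ⟨k, hk1, hk2⟩ := ih (n - t_bits.toNat) (by omega) _ hlen
      (ret ++ [conv_bits_alt_num (Q.take t_bits.toNat)])
    refine ⟨t_bits.toNat + k, ?_, ?_⟩
    · rw [hk1, List.drop_drop]
    · rw [hk2]
      exact (Nat.mod_eq_sub_mod (by omega)).symm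
  · rw [dif_neg h]
    have : Q.length < t_bits.toNat := by omega
    exact ⟨0, by simp, by rw [Nat.mod_eq_of_lt (by omega)]; omega⟩

theorem chop_append {t_bits : Int} (X Y ret : List Int) :
    conv_bits_alt_chop t_bits (X ++ Y) ret =
      conv_bits_alt_chop t_bits ((conv_bits_alt_chop t_bits X ret).1 ++ Y)
        (conv_bits_alt_chop t_bits X ret).2 := by
  induction hn : X.length using Nat.strong_induction_on generalizing X ret with
  | _ n ih =>
  by_cases h : t_bits ≤ (X.length : Int) ∧ 1 ≤ t_bits
  · have hle : t_bits.toNat ≤ X.length := by omega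
    have hXY : t_bits ≤ ((X ++ Y).length : Int) ∧ 1 ≤ t_bits := by
      constructor
      · simp only [List.length_append]; push_cast; omega
      · exact h.2
    have hstep : conv_bits_alt_chop t_bits X ret =
        conv_bits_alt_chop t_bits (X.drop t_bits.toNat)
          (ret ++ [conv_bits_alt_num (X.take t_bits.toNat)]) := by
      conv_lhs => rw [conv_bits_alt_chop, dif_pos h]
    conv_lhs => rw [conv_bits_alt_chop, dif_pos hXY]
    rw [List.take_append_of_le_length hle, List.drop_append_of_le_length hle, hstep]
    have hlen : (X.drop t_bits.toNat).length = n - t_bits.toNat := by simp [hn]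
    exact ih (n - t_bits.toNat) (by omega) _ _ hlen
  · have hX : conv_bits_alt_chop t_bits X ret = (X, ret) := by
      rw [conv_bits_alt_chop, dif_neg h]
    rw [hX]

-- ---- A's while loop is B's chop ----

theorem while_eq_chop {t_bits : Int} (ht : 1 ≤ t_bits) :
    ∀ Q acc ret, IsBits Q → 0 ≤ acc → acc % 2 ^ Q.length = conv_bits_alt_num Q →
      conv_bits_while t_bits (2 ^ t_bits.toNat - 1) acc (Q.length : Int) ret =
        (((conv_bits_alt_chop t_bits Q ret).1.length : Int),
          (conv_bits_alt_chop t_bits Q ret).2) := by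
  intro Q
  induction hn : Q.length using Nat.strong_induction_on generalizing Q with
  | _ n ih =>
  intro acc ret hQ hacc hmod
  subst hn
  by_cases h : t_bits ≤ (Q.length : Int) ∧ 1 ≤ t_bits
  · have hQl : t_bits.toNat ≤ Q.length := by omega
    have htn1 : 1 ≤ t_bits.toNat := by omega
    -- abbreviations
    have hTake : (Q.take t_bits.toNat).length = t_bits.toNat := by
      simp [List.length_take]; omega
    have hDrop : (Q.drop t_bits.toNat).length = Q.length - t_bits.toNat := by simp
    have hbTake : IsBits (Q.take t_bits.toNat) := isBits_subset hQ (List.take_subset _ _)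
    have hbDrop : IsBits (Q.drop t_bits.toNat) := isBits_subset hQ (List.drop_subset _ _)
    have hbtT := bnum_bounds hbTake
    have hbtD := bnum_bounds hbDrop
    have hnumQ : conv_bits_alt_num Q =
        conv_bits_alt_num (Q.take t_bits.toNat) * 2 ^ (Q.length - t_bits.toNat) +
          conv_bits_alt_num (Q.drop t_bits.toNat) := by
      conv_lhs => rw [← List.take_append_drop t_bits.toNat Q]
      rw [bnum_append, hDrop]
    have hsplitpow : (2:Int) ^ Q.length =
        2 ^ (Q.length - t_bits.toNat) * 2 ^ t_bits.toNat := by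
      rw [← pow_add]; congr 1; omega
    have hKid := Int.mul_ediv_add_emod acc (2 ^ Q.length)
    have hK0 : 0 ≤ acc / 2 ^ Q.length := Int.ediv_nonneg hacc (by positivity)
    -- the emitted group is the value of the first t_bits bits
    have e1 : ((Q.length : Int) - t_bits).toNat = Q.length - t_bits.toNat := by omega
    have hdiv : acc / 2 ^ (Q.length - t_bits.toNat) =
        conv_bits_alt_num (Q.drop t_bits.toNat) / 2 ^ (Q.length - t_bits.toNat) +
          (conv_bits_alt_num (Q.take t_bits.toNat) + 2 ^ t_bits.toNat * (acc / 2 ^ Q.length)) := by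
      rw [← Int.add_mul_ediv_right _ _ (show (2:Int) ^ (Q.length - t_bits.toNat) ≠ 0 by positivity)]
      congr 1
      rw [hmod, hnumQ] at hKid
      linear_combination -hKid + (acc / 2 ^ Q.length) * hsplitpow
    have hdiv0 : conv_bits_alt_num (Q.drop t_bits.toNat) / 2 ^ (Q.length - t_bits.toNat) = 0 :=
      Int.ediv_eq_zero_of_lt hbtD.1 (by rw [← hDrop]; exact hbtD.2)
    have hgroup : Int.land (acc >>> ((Q.length : Int) - t_bits).toNat) (2 ^ t_bits.toNat - 1) =
        conv_bits_alt_num (Q.take t_bits.toNat) := by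
      rw [e1, shiftrN, land_mask (Int.ediv_nonneg hacc (by positivity))]
      rw [hdiv, hdiv0, zero_add, Int.add_mul_emod_self_left]
      have hlt2 : conv_bits_alt_num (Q.take t_bits.toNat) < 2 ^ t_bits.toNat := by
        have h2 := hbtT.2; rwa [hTake] at h2
      exact Int.emod_eq_of_lt hbtT.1 hlt2
    -- new invariant for the dropped tail
    have hmod' : acc % 2 ^ (Q.drop t_bits.toNat).length =
        conv_bits_alt_num (Q.drop t_bits.toNat) := by
      rw [hDrop]
      have hd : (2:Int) ^ (Q.length - t_bits.toNat) ∣ 2 ^ Q.length :=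
        pow_dvd_pow 2 (by omega)
      have hsfx := bnum_suffix (X := Q.take t_bits.toNat) hbDrop
      rw [List.take_append_drop, hDrop] at hsfx
      calc acc % 2 ^ (Q.length - t_bits.toNat)
          = acc % 2 ^ Q.length % 2 ^ (Q.length - t_bits.toNat) :=
            (Int.emod_emod_of_dvd acc hd).symm
        _ = conv_bits_alt_num (Q.drop t_bits.toNat) := by rw [hmod, ← hsfx]
    have hstep : conv_bits_alt_chop t_bits Q ret =
        conv_bits_alt_chop t_bits (Q.drop t_bits.toNat)
          (ret ++ [conv_bits_alt_num (Q.take t_bits.toNat)]) := by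
      conv_lhs => rw [conv_bits_alt_chop, dif_pos h]
    rw [conv_bits_while, dif_pos h, hgroup, hstep]
    have harg : (Q.length : Int) - t_bits = ((Q.drop t_bits.toNat).length : Int) := by
      rw [hDrop]; omega
    rw [harg]
    exact ih _ (by simp; omega) _ rfl acc _ hbDrop hacc hmod'
  · rw [conv_bits_while, dif_neg h]
    have hchop : conv_bits_alt_chop t_bits Q ret = (Q, ret) := by
      rw [conv_bits_alt_chop, dif_neg h]
    rw [hchop]

-- ---- A's main loop is "flatten then chop" ----

theorem loop_eq_chop {f_bits t_bits : Int} (hf : 1 ≤ f_bits) (ht : 1 ≤ t_bits) :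
    ∀ (d : List Int) (acc : Int) (P ret : List Int),
      (∀ v ∈ d, 0 ≤ v ∧ v < 2 ^ f_bits.toNat) →
      IsBits P → P.length < t_bits.toNat → 0 ≤ acc →
      acc % 2 ^ P.length = conv_bits_alt_num P →
      ∃ acc', conv_bits_loop f_bits t_bits (2 ^ t_bits.toNat - 1) d acc (P.length : Int) ret =
          some (acc',
            ((conv_bits_alt_chop t_bits (P ++ streamE f_bits d) ret).1.length : Int),
            (conv_bits_alt_chop t_bits (P ++ streamE f_bits d) ret).2) ∧
        0 ≤ acc' ∧
        acc' % 2 ^ (conv_bits_alt_chop t_bits (P ++ streamE f_bits d) ret).1.length =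
          conv_bits_alt_num (conv_bits_alt_chop t_bits (P ++ streamE f_bits d) ret).1 := by
  intro d
  induction d with
  | nil =>
    intro acc P ret _ _ hPlt hacc hmod
    have hch : conv_bits_alt_chop t_bits P ret = (P, ret) := by
      rw [conv_bits_alt_chop, dif_neg (by rintro ⟨h1, _⟩; omega)]
    refine ⟨acc, ?_, hacc, ?_⟩ <;> simp [conv_bits_loop, streamE, hch, hmod]
  | cons v d ihd =>
    intro acc P ret hd hP hPlt hacc hmod
    obtain ⟨hv0, hvlt⟩ := hd v (by simp)
    have hfn : (0:Int) ≤ f_bits := by omega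
    have hsr : v >>> f_bits.toNat = 0 := by
      rw [shiftrN]; exact Int.ediv_eq_zero_of_lt hv0 hvlt
    rw [conv_bits_loop, if_neg (by rintro (h | h | h) <;> omega)]
    dsimp only
    have hEl : (conv_bits_alt_emit f_bits v).length = f_bits.toNat := emit_length hfn v
    have hQlen : (P ++ conv_bits_alt_emit f_bits v).length = P.length + f_bits.toNat := by
      simp [hEl]
    have hbQ : IsBits (P ++ conv_bits_alt_emit f_bits v) := by
      intro b hb
      rcases List.mem_append.mp hb with hb | hb
      · exact hP b hb
      · exact emit_isBits f_bits hv0 b hb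
    rw [lor_disjoint f_bits.toNat hacc hv0 hvlt]
    have hacc'0 : 0 ≤ acc * 2 ^ f_bits.toNat + v := by positivity
    have harg : (P.length : Int) + f_bits = (((P ++ conv_bits_alt_emit f_bits v).length : Nat) : Int) := by
      rw [hQlen]; push_cast; omega
    have hbP := bnum_bounds hP
    have hmodQ : (acc * 2 ^ f_bits.toNat + v) % 2 ^ (P ++ conv_bits_alt_emit f_bits v).length =
        conv_bits_alt_num (P ++ conv_bits_alt_emit f_bits v) := by
      have hnum : conv_bits_alt_num (P ++ conv_bits_alt_emit f_bits v) =
          conv_bits_alt_num P * 2 ^ f_bits.toNat + v := by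
        rw [bnum_append, hEl, emit_bnum hfn hv0, Int.emod_eq_of_lt hv0 hvlt]
      have hKid := Int.mul_ediv_add_emod acc (2 ^ P.length)
      rw [hmod] at hKid
      have hpw : (2:Int) ^ (P.length + f_bits.toNat) = 2 ^ P.length * 2 ^ f_bits.toNat :=
        pow_add 2 _ _
      have hrw : acc * 2 ^ f_bits.toNat + v =
          (conv_bits_alt_num P * 2 ^ f_bits.toNat + v) +
            2 ^ (P.length + f_bits.toNat) * (acc / 2 ^ P.length) := by
        linear_combination -(2:Int) ^ f_bits.toNat * hKid - (acc / 2 ^ P.length) * hpw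
      rw [hQlen, hnum, hrw, Int.add_mul_emod_self_left]
      have hfp : (0:Int) < 2 ^ f_bits.toNat := by positivity
      refine Int.emod_eq_of_lt (by nlinarith [hbP.1]) (by nlinarith [hbP.2, hvlt]) 
    rw [harg, while_eq_chop ht _ _ _ hbQ hacc'0 hmodQ]
    obtain ⟨k, hk1, hk2⟩ := chop_pending ht (P ++ conv_bits_alt_emit f_bits v) ret
    have hpbits : IsBits (conv_bits_alt_chop t_bits (P ++ conv_bits_alt_emit f_bits v) ret).1 := by
      rw [hk1]; exact isBits_subset hbQ (List.drop_subset _ _)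
    have hplt : (conv_bits_alt_chop t_bits (P ++ conv_bits_alt_emit f_bits v) ret).1.length <
        t_bits.toNat := by
      rw [hk2]; exact Nat.mod_lt _ (by omega)
    have hple : (conv_bits_alt_chop t_bits (P ++ conv_bits_alt_emit f_bits v) ret).1.length ≤
        (P ++ conv_bits_alt_emit f_bits v).length := by
      rw [hk1]; simp
    have hmodP : (acc * 2 ^ f_bits.toNat + v) %
        2 ^ (conv_bits_alt_chop t_bits (P ++ conv_bits_alt_emit f_bits v) ret).1.length =
        conv_bits_alt_num (conv_bits_alt_chop t_bits (P ++ conv_bits_alt_emit f_bits v) ret).1 := by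
      have hd2 : (2:Int) ^ (conv_bits_alt_chop t_bits (P ++ conv_bits_alt_emit f_bits v) ret).1.length ∣
          2 ^ (P ++ conv_bits_alt_emit f_bits v).length := pow_dvd_pow 2 hple
      have hsfx := bnum_suffix (X := (P ++ conv_bits_alt_emit f_bits v).take k)
        (Y := (P ++ conv_bits_alt_emit f_bits v).drop k)
        (isBits_subset hbQ (List.drop_subset _ _))
      rw [List.take_append_drop] at hsfx
      rw [← Int.emod_emod_of_dvd _ hd2, hmodQ, hk1, ← hsfx]
    obtain ⟨acc', hloop, hacc'2, hmod'⟩ :=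
      ihd (acc * 2 ^ f_bits.toNat + v)
        (conv_bits_alt_chop t_bits (P ++ conv_bits_alt_emit f_bits v) ret).1
        (conv_bits_alt_chop t_bits (P ++ conv_bits_alt_emit f_bits v) ret).2
        (fun w hw => hd w (by simp [hw])) hpbits hplt hacc'0 hmodP
    have hS : P ++ streamE f_bits (v :: d) =
        (P ++ conv_bits_alt_emit f_bits v) ++ streamE f_bits d := by
      simp only [streamE, List.flatMap_cons, List.append_assoc]
    have hCA := chop_append (t_bits := t_bits)
      (P ++ conv_bits_alt_emit f_bits v) (streamE f_bits d) ret
    rw [hS, hCA]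
    exact ⟨acc', hloop, hacc'2, hmod'⟩

theorem flat_eq {f_bits : Int} (hf : 0 ≤ f_bits) :
    ∀ (d acc : List Int), (∀ v ∈ d, 0 ≤ v ∧ v < 2 ^ f_bits.toNat) →
      conv_bits_alt_flat f_bits d acc = some (acc ++ streamE f_bits d) := by
  intro d
  induction d with
  | nil => intro acc _; simp [conv_bits_alt_flat, streamE]
  | cons v d ih =>
    intro acc hd
    obtain ⟨hv0, hvlt⟩ := hd v (by simp)
    rw [conv_bits_alt_flat]
    have hsr : v >>> f_bits.toNat = 0 := by
      rw [← Int.shiftRight_natCast_right, shiftr_eq]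
      exact Int.ediv_eq_zero_of_lt hv0 hvlt
    rw [if_neg (by rintro (h | h | h) <;> omega)]
    rw [ih _ (fun w hw => hd w (by simp [hw]))]
    simp [streamE]

-- ===== VERDICT (by name: the statement is the Claim_ definition above) =====
theorem conv_bits_spec : Claim_equal_conv_bits := by
  unfold Claim_equal_conv_bits Spec_conv_bits
  intro d f_bits t_bits pad _ hpre
  obtain ⟨hf, ht, hv, hclause⟩ := hpre
  have hfn : (0:Int) ≤ f_bits := by omega
  have hv0s : ∀ v ∈ d, 0 ≤ v := fun v hvm => (hv v hvm).1
  unfold conv_bits conv_bits_alt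
  rw [if_neg (by omega : ¬ t_bits < 0)]
  have hmaxv : ((1 : Int) <<< t_bits.toNat) - 1 = 2 ^ t_bits.toNat - 1 := by
    rw [shiftlN]; ring
  dsimp only
  rw [hmaxv, flat_eq hfn d [] hv]
  obtain ⟨acc', hloop, hacc', hmodP⟩ :=
    loop_eq_chop hf ht d 0 [] [] hv (by intro b hb; cases hb) (by simp; omega) le_rfl
      (by simp [conv_bits_alt_num])
  simp only [List.length_nil, Nat.cast_zero, List.nil_append] at hloop hmodP
  rw [hloop]
  dsimp only
  simp only [List.nil_append]
  obtain ⟨k, hk1, hk2⟩ := chop_pending ht (streamE f_bits d) []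
  set C := conv_bits_alt_chop t_bits (streamE f_bits d) [] with hC
  set L := C.1.length with hL
  have hbC : IsBits C.1 := by
    rw [hk1]; exact isBits_subset (stream_isBits f_bits hv0s) (List.drop_subset _ _)
  have hbnC := bnum_bounds hbC
  have hLlt : L < t_bits.toNat := by rw [hk2]; exact Nat.mod_lt _ (by omega)
  by_cases hE : C.1 = []
  · -- no leftover bits
    have hL0 : L = 0 := by rw [hL, hE]; rfl
    have ht0 : ((t_bits - (L : Int)).toNat) = t_bits.toNat := by omega
    have hland : Int.land (acc' <<< (t_bits - (L : Int)).toNat) (2 ^ t_bits.toNat - 1) = 0 := by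
      rw [ht0, shiftlN, land_mask (by positivity) t_bits.toNat, Int.mul_emod_left]
    rw [hL0] at hland
    simp only [Nat.cast_zero] at hland
    simp only [hE, List.isEmpty_nil, if_true, hL0, Nat.cast_zero]
    rw [if_neg (by cases pad <;> simp)]
    rw [if_neg (by rw [hland]; rintro (hh | hh) <;> omega)]
  · -- leftover bits present
    have hL1 : 1 ≤ L := by
      rcases Nat.eq_zero_or_pos L with h0 | h0
      · exact absurd (List.length_eq_zero_iff.mp (hL ▸ h0)) hE
      · exact h0
    have htm : ((t_bits - (L : Int)).toNat) = t_bits.toNat - L := by omega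
    have hKid := Int.mul_ediv_add_emod acc' (2 ^ L)
    rw [hmodP] at hKid
    have hpw : (2:Int) ^ t_bits.toNat = 2 ^ L * 2 ^ (t_bits.toNat - L) := by
      rw [← pow_add]; congr 1; omega
    have hland : Int.land (acc' <<< (t_bits - (L : Int)).toNat) (2 ^ t_bits.toNat - 1) =
        conv_bits_alt_num C.1 * 2 ^ (t_bits.toNat - L) := by
      rw [htm, shiftlN, land_mask (by positivity) t_bits.toNat]
      have hrw : acc' * 2 ^ (t_bits.toNat - L) =
          conv_bits_alt_num C.1 * 2 ^ (t_bits.toNat - L) +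
            2 ^ t_bits.toNat * (acc' / 2 ^ L) := by
        linear_combination -(2:Int) ^ (t_bits.toNat - L) * hKid - (acc' / 2 ^ L) * hpw
      rw [hrw, Int.add_mul_emod_self_left]
      have hp1 : (0:Int) < 2 ^ (t_bits.toNat - L) := by positivity
      refine Int.emod_eq_of_lt (by nlinarith [hbnC.1]) (by nlinarith [hbnC.2])
    have hEmp : C.1.isEmpty = false := by simp [hE]
    rw [hEmp]
    cases pad with
    | true =>
      rw [if_pos (show (true && !((L : Int) == 0)) = true by simp; omega)]
      rw [if_neg (show ¬ (false = true) by simp)]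
      rw [if_pos rfl]
      rw [hland, htm, shiftlN]
    | false =>
      -- the unpadded case: Pre_'s leftover clause makes both checks pass
      rcases hclause with hclause | hclause
      · exact absurd hclause (by simp)
      obtain ⟨hLf, hz⟩ := hclause
      have hSlen : (streamE f_bits d).length = d.length * f_bits.toNat :=
        stream_length hfn d
      have hLint : ((L : Nat) : Int) = ((d.length : Int) * f_bits) % t_bits := by
        show ((L : Nat) : Int) = _
        rw [hk2, hSlen]
        rw [show ((d.length : Int) * f_bits) = ((d.length * f_bits.toNat : Nat) : Int) by
          push_cast; rw [Int.toNat_of_nonneg hfn]]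
        rw [show t_bits = ((t_bits.toNat : Nat) : Int) from (Int.toNat_of_nonneg (by omega)).symm]
        exact Int.natCast_emod _ _
      have hLfn : L < f_bits.toNat := by omega
      -- the leftover bits are the low L bits of the last value, which Pre_ says are zero
      have hnum0 : conv_bits_alt_num C.1 = 0 := by
        rcases List.eq_nil_or_concat d with hnil | ⟨d0, w, hdw⟩
        · exfalso
          apply hE
          rw [hk1, hnil]
          simp [streamE]
        · rw [List.concat_eq_append] at hdw
          obtain ⟨hw0, hwlt⟩ := hv w (by rw [hdw]; simp)
          have hCnum : conv_bits_alt_num C.1 =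
              conv_bits_alt_num (streamE f_bits d) % 2 ^ L := by
            have hsfx := bnum_suffix (X := (streamE f_bits d).take k)
              (Y := (streamE f_bits d).drop k)
              (isBits_subset (stream_isBits f_bits hv0s) (List.drop_subset _ _))
            rw [List.take_append_drop] at hsfx
            rw [← hk1] at hsfx
            exact hsfx
          have hnumS : conv_bits_alt_num (streamE f_bits d) =
              conv_bits_alt_num (streamE f_bits d0) * 2 ^ f_bits.toNat + w := by
            rw [hdw]
            rw [show streamE f_bits (d0 ++ [w]) =
                streamE f_bits d0 ++ conv_bits_alt_emit f_bits w by simp [streamE]]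
            rw [bnum_append, emit_length hfn, emit_bnum hfn hw0,
              Int.emod_eq_of_lt hw0 hwlt]
          have hpw2 : (2:Int) ^ f_bits.toNat = 2 ^ L * 2 ^ (f_bits.toNat - L) := by
            rw [← pow_add]; congr 1; omega
          have hzw : w % 2 ^ L = 0 := by
            have hgl : d.getLastD 0 = w := by
              rw [hdw, List.getLastD_eq_getLast?]
              simp
            have hexp : (((d.length : Int) * f_bits) % t_bits).toNat = L := by omega
            rw [hgl, hexp] at hz
            exact hz
          have hrw2 : conv_bits_alt_num (streamE f_bits d) =
              w + 2 ^ L * (conv_bits_alt_num (streamE f_bits d0) * 2 ^ (f_bits.toNat - L)) := by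
            rw [hnumS]
            linear_combination conv_bits_alt_num (streamE f_bits d0) * hpw2
          rw [hCnum, hrw2, Int.add_mul_emod_self_left, hzw]
      rw [if_neg (show ¬ (false && !((L : Int) == 0)) = true by simp)]
      rw [if_neg (by
        rw [hland, hnum0]
        rintro (hh | hh)
        · omega
        · simp at hh)]
      rw [if_neg (show ¬ (false = true) by simp)]
      rw [if_neg (show ¬ (false = true) by simp)]
      rw [if_neg (by
        rintro (hh | hh)
        · omega
        · rcases List.any_eq_true.mp hh with ⟨b, hbm, hbne⟩
          exact absurd (bnum_eq_zero hbC hnum0 b hbm) (by simpa using hbne))]
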